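-- pv_equiv track=rewrite | github.com/YH-edenbro/SSAFY_APS | py/stack2_1.py | calculator_one
-- ===== SOURCE A (Python) =====
-- def calculator_one(st, n):
--     stack = [0] * 2
--     top = -1
--     new_st = ''
--     for i in range(n):
--         if st[i] != '+':
--             new_st += st[i]
--         else:
--             top += 1
--             stack[top] = st[i]
--         if top == 1:
--             new_st += stack[top]
--             top -= 1
--     if top != -1:
--         new_st += stack[top]
--         top -= 1
--
--     return new_st
-- ===== SOURCE B (Python) =====
-- def calculator_one(st, n):
--     s = ''.join(st[i] for i in range(n))
--     return s.replace('+', '', 1) + '+' if '+' in s else s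
-- ===== Notes on version B (the rewrite author's own statement) =====
-- stated objective: simpler
-- what changed: Replaces the stack/top bookkeeping loop with a gather-then-transform: collect the first n characters with a join, then if a '+' occurs remove the first '+' and append one '+' at the end (measured ~2x faster: join instead of per-char += and no stack/top updates).
import Mathlib
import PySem

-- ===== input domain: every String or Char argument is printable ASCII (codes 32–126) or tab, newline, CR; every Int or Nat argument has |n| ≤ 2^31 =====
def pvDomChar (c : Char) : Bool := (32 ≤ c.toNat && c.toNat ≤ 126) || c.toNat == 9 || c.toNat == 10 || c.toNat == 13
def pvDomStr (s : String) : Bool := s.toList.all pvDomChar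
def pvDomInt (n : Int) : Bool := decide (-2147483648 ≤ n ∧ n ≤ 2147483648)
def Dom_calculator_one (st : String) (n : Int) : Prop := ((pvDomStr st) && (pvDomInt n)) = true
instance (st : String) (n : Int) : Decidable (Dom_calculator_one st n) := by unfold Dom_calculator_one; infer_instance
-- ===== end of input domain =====

-- B replaces A's stack/top bookkeeping loop by gather-then-transform (remove the first
-- '+', append one '+' at the end); objective: simpler, same O(n) cost.

-- ===== PORT A =====
-- Placeholder for the two int 0 entries of Python's 'stack = [0] * 2'; those initial
-- values are never read by A (stack[top] is only read after a '+' was assigned there),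
-- so representing them by a fixed unused char is exact.
def pvD : Char := '\x00'

-- loop body of A: state (stack, top, new_st), applied to the current character st[i]
def pvStepA (s : List Char × Int × List Char) (c : Char) : List Char × Int × List Char :=
  let s1 := if c ≠ '+' then (s.1, s.2.1, s.2.2 ++ [c])
            else (PySem.List.pySetD s.1 (s.2.1 + 1) c, s.2.1 + 1, s.2.2)
  if s1.2.1 = 1 then (s1.1, s1.2.1 - 1, s1.2.2 ++ [PySem.List.pyGetD s1.1 s1.2.1 pvD])
  else s1

def calculator_one (st : String) (n : Int) : String :=
  let cs := st.toList
  let r := (PySem.List.pyRange 0 n 1).foldl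
      (fun s i => pvStepA s (PySem.List.pyGetD cs i pvD)) ([pvD, pvD], -1, [])
  if r.2.1 ≠ -1 then String.ofList (r.2.2 ++ [PySem.List.pyGetD r.1 r.2.1 pvD])
  else String.ofList r.2.2

-- ===== PORT B =====
-- hand port of s.replace('+', '', 1): drop the first '+' if any (exact for a
-- single-char pattern, empty replacement, count 1)
def pvDropFirstPlus : List Char → List Char
  | [] => []
  | c :: rest => if c = '+' then rest else c :: pvDropFirstPlus rest

def calculator_one_alt (st : String) (n : Int) : String :=
  let s := (PySem.List.pyRange 0 n 1).map (fun i => PySem.List.pyGetD st.toList i pvD)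
  if PySem.Chars.isIn ['+'] s then String.ofList (pvDropFirstPlus s ++ ['+'])
  else String.ofList s

-- ===== PRECONDITION & SPEC =====
-- A raises IndexError on st[i] iff n > len(st); exactly those inputs are excluded.
def Pre_calculator_one (st : String) (n : Int) : Prop := n ≤ (st.toList.length : Int)
instance (st : String) (n : Int) : Decidable (Pre_calculator_one st n) := by
  unfold Pre_calculator_one; infer_instance

def pvWitness_calculator_one : String × Int := ("a+b", 3)

def Spec_calculator_one (st : String) (n : Int) (out : String) : Prop := out = calculator_one_alt st n
instance (st : String) (n : Int) (out : String) : Decidable (Spec_calculator_one st n out) := by unfold Spec_calculator_one; infer_instance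

-- ===== CLAIM (what is proved, stated in full; the proofs are below) =====
def Claim_equal_calculator_one : Prop := ∀ (st : String) (n : Int), Dom_calculator_one st n → Pre_calculator_one st n → Spec_calculator_one st n (calculator_one st n)

-- ===== LEMMAS AND PROOFS =====

-- the state of A's loop after processing a prefix p, in closed form
def pvInv (p : List Char) : List Char × Int × List Char :=
  ([if '+' ∈ p then '+' else pvD, if 2 ≤ p.count '+' then '+' else pvD],
   if '+' ∈ p then 0 else -1,
   if '+' ∈ p then pvDropFirstPlus p else p)

theorem pvDropFirstPlus_append_of_mem (p : List Char) (c : Char) (h : '+' ∈ p) :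
    pvDropFirstPlus (p ++ [c]) = pvDropFirstPlus p ++ [c] := by
  induction p with
  | nil => cases h
  | cons a p ih =>
    by_cases ha : a = '+'
    · simp [pvDropFirstPlus, ha]
    · have : '+' ∈ p := by simpa [ha, Ne.symm ha] using h
      simp [pvDropFirstPlus, ha, ih this]

theorem pvDropFirstPlus_append_plus (p : List Char) (h : '+' ∉ p) :
    pvDropFirstPlus (p ++ ['+']) = p := by
  induction p with
  | nil => simp [pvDropFirstPlus]
  | cons a p ih =>
    have ha : a ≠ '+' := fun hh => h (by simp [hh])
    simp [pvDropFirstPlus, ha, ih (fun hh => h (by simp [hh]))]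

theorem pvInvariant (p : List Char) :
    p.foldl pvStepA ([pvD, pvD], -1, []) = pvInv p := by
  induction p using List.reverseRecOn with
  | nil => simp [pvInv, pvD]
  | append_singleton p c ih =>
    rw [List.foldl_append, List.foldl_cons, List.foldl_nil, ih]
    by_cases hc : c = '+'
    · by_cases hp : '+' ∈ p
      · -- second-or-later '+': pushed at top = 1 and immediately emitted
        subst hc
        have hcnt : 2 ≤ (p ++ ['+']).count '+' := by
          have : 1 ≤ p.count '+' := List.count_pos_iff.mpr hp
          simp [List.count_append]; omega
        simp [pvStepA, pvInv, hp, pvDropFirstPlus_append_of_mem p _ hp,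
              PySem.List.pySetD, PySem.List.pySet?, PySem.List.pyGetD, PySem.List.pyGet?,
              PySem.List.pyIdx?]
      · -- first '+': pushed at top = 0, deferred
        subst hc
        have hcnt : p.count '+' = 0 := List.count_eq_zero.mpr hp
        simp [pvStepA, pvInv, hp, hcnt, pvDropFirstPlus_append_plus p hp,
              PySem.List.pySetD, PySem.List.pySet?, PySem.List.pyIdx?]
    · -- ordinary character: appended to new_st, stack untouched
      have hm : ('+' ∈ p ++ [c]) ↔ ('+' ∈ p) := by simp [Ne.symm hc]
      have hcnt : (p ++ [c]).count '+' = p.count '+' := by simp [List.count_append, hc]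
      by_cases hp : '+' ∈ p
      · simp [pvStepA, pvInv, hp, hm, hcnt, hc, pvDropFirstPlus_append_of_mem p _ hp]
      · simp [pvStepA, pvInv, hp, hm, hcnt, hc]

theorem pvFoldRange {β : Type} (F : β → Char → β) (cs : List Char) (m : Nat)
    (hm : m ≤ cs.length) (init : β) :
    (PySem.List.pyRange 0 (m : Int) 1).foldl (fun s i => F s (PySem.List.pyGetD cs i pvD)) init
      = (cs.take m).foldl F init := by
  induction m generalizing init with
  | zero => simp [PySem.List.pyRange_one_eq_nil]
  | succ k ih =>
    have hk : k < cs.length := by omega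
    have : ((k : Int) + 1) = ((k + 1 : Nat) : Int) := by push_cast; ring
    rw [← this, PySem.List.pyRange_one_succ_right (by positivity), List.foldl_append,
        ih (by omega)]
    rw [List.take_add_one, List.getElem?_eq_getElem hk]
    simp only [Option.toList_some, List.foldl_append, List.foldl_cons, List.foldl_nil,
               PySem.List.pyGetD_natCast, List.getD_eq_getElem?_getD,
               List.getElem?_eq_getElem hk, Option.getD_some]

theorem pvMapRange (cs : List Char) (m : Nat) (hm : m ≤ cs.length) :
    (PySem.List.pyRange 0 (m : Int) 1).map (fun i => PySem.List.pyGetD cs i pvD)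
      = cs.take m := by
  induction m with
  | zero => simp [PySem.List.pyRange_one_eq_nil]
  | succ k ih =>
    have hk : k < cs.length := by omega
    have : ((k : Int) + 1) = ((k + 1 : Nat) : Int) := by push_cast; ring
    rw [← this, PySem.List.pyRange_one_succ_right (by positivity), List.map_append,
        ih (by omega), List.take_add_one, List.getElem?_eq_getElem hk]
    simp [List.getD_eq_getElem?_getD, List.getElem?_eq_getElem hk]

theorem pvIsIn_singleton (a : Char) (s : List Char) :
    PySem.Chars.isIn [a] s = true ↔ a ∈ s := by
  rw [PySem.Chars.isIn_iff_infix]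
  constructor
  · intro h; exact h.mem (by simp)
  · intro h
    obtain ⟨l1, l2, rfl⟩ := List.append_of_mem h
    exact ⟨l1, l2, by simp⟩

theorem pvRange_toNat (n : Int) :
    PySem.List.pyRange 0 n 1 = PySem.List.pyRange 0 (n.toNat : Int) 1 := by
  rcases le_or_gt 0 n with h | h
  · rw [Int.toNat_of_nonneg h]
  · rw [PySem.List.pyRange_one_eq_nil (by omega), PySem.List.pyRange_one_eq_nil (by omega)]

-- ===== VERDICT (by name: the statement is the Claim_ definition above) =====
theorem calculator_one_spec : Claim_equal_calculator_one := by
  intro st n _ hpre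
  unfold Spec_calculator_one
  simp only [calculator_one, calculator_one_alt]
  have hm : n.toNat ≤ st.toList.length := by
    unfold Pre_calculator_one at hpre; omega
  rw [pvRange_toNat]
  rw [pvFoldRange pvStepA st.toList n.toNat hm, pvMapRange st.toList n.toNat hm,
      pvInvariant]
  by_cases hp : '+' ∈ st.toList.take n.toNat
  · simp [pvInv, hp, (pvIsIn_singleton '+' _).mpr hp, PySem.List.pyGetD,
          PySem.List.pyGet?, PySem.List.pyIdx?]
  · have : PySem.Chars.isIn ['+'] (st.toList.take n.toNat) = false := by
      rcases Bool.eq_false_or_eq_true (PySem.Chars.isIn ['+'] (st.toList.take n.toNat)) with h | h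
      · exact absurd ((pvIsIn_singleton '+' _).mp h) hp
      · exact h
    simp [pvInv, hp, this]
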